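-- pv_equiv track=rewrite | github.com/mtorres253/morning-automation | skills/resume-matcher/resume-matcher/scripts/match_resume.py | extract_header
-- ===== SOURCE A (Python) =====
-- def extract_header(resume_content):
--     """
--     Extract name and contact info from resume.
--     Returns the first few lines before first ## section.
--     """
--     lines = resume_content.split('\n')
--     header_lines = []
--     for line in lines:
--         if line.startswith('##'):
--             break
--         header_lines.append(line)
--     return '\n'.join(header_lines).strip()
-- ===== SOURCE B (Python) =====
-- def extract_header(resume_content):
--     if resume_content.startswith('##'):
--         return ''
--     i = resume_content.find('\n##')
--     if i == -1:
--         return resume_content.strip()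
--     return resume_content[:i].strip()
-- ===== Notes on version B (the rewrite author's own statement) =====
-- stated objective: alternative
-- what changed: B replaces A's split-into-lines plus explicit loop-with-break by a single substring search on the raw string for the first heading marker at a line start, stripping the prefix before it; no line list is ever built.
import Mathlib
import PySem

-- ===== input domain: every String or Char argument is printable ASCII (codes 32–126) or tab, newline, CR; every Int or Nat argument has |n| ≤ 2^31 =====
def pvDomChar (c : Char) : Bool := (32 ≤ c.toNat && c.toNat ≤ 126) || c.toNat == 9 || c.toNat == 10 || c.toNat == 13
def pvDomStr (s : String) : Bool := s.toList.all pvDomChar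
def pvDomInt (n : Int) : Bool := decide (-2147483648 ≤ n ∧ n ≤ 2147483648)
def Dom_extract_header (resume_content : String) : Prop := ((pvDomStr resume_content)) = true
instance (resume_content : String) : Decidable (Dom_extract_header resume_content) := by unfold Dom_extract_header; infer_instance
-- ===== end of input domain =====

-- B replaces A's split-into-lines loop-with-break by a single substring search on the raw
-- string for the first heading marker at a line start; equal return values, no speed claim.

-- ===== PORT A =====
-- the for-loop with break over the line list, collecting header_lines
def pvCollect (lines : List (List Char)) : List (List Char) :=
  match lines with
  | [] => []
  | l :: ls => if PySem.Chars.startswith l ['#', '#'] then [] else l :: pvCollect ls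

def extract_header (resume_content : String) : String :=
  let lines := PySem.Chars.splitOn resume_content.toList ['\n']
  let header_lines := pvCollect lines
  String.ofList (PySem.Chars.strip (PySem.Chars.join ['\n'] header_lines))

-- ===== PORT B =====
def extract_header_alt (resume_content : String) : String :=
  if PySem.Str.startswith resume_content "##" then ""
  else
    let i := PySem.Str.find resume_content "\n##"
    if i = -1 then PySem.Str.strip resume_content
    else PySem.Str.strip (PySem.Str.slice resume_content none (some i))

-- ===== PRECONDITION & SPEC =====
def Spec_extract_header (resume_content : String) (out : String) : Prop := out = extract_header_alt resume_content
instance (resume_content : String) (out : String) : Decidable (Spec_extract_header resume_content out) := by unfold Spec_extract_header; infer_instance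

-- ===== CLAIM (what is proved, stated in full; the proofs are below) =====
def Claim_equal_extract_header : Prop := ∀ (resume_content : String), Dom_extract_header resume_content → Spec_extract_header resume_content (extract_header resume_content)

-- ===== LEMMAS AND PROOFS =====

-- reference splitter for a one-character separator
def pvSplits (c : Char) : List Char → List (List Char)
  | [] => [[]]
  | x :: xs =>
    if x = c then [] :: pvSplits c xs
    else
      match pvSplits c xs with
      | [] => [[x]]
      | p :: ps => (x :: p) :: ps

-- the core of B on char lists
def pvBcore (cs : List Char) : List Char :=
  if PySem.Chars.startswith cs ['#', '#'] then []
  else if PySem.Chars.find cs ['\n', '#', '#'] = -1 then cs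
  else cs.take (PySem.Chars.find cs ['\n', '#', '#']).toNat

lemma pvModifyHead_id {α : Type} (l : List (List α)) : List.modifyHead (fun p => p) l = l := by
  cases l <;> rfl

lemma pvSplits_ne_nil (c : Char) (l : List Char) : pvSplits c l ≠ [] := by
  cases l with
  | nil => simp [pvSplits]
  | cons x xs =>
    simp only [pvSplits]
    split
    · simp
    · split <;> simp

lemma pvSplits_go_eq (c : Char) :
    ∀ (fuel : Nat) (l cur : List Char) (accs : List (List Char)), l.length ≤ fuel →
      PySem.Chars.splitOn.go [c] fuel l cur accs =
        accs.reverse ++ (pvSplits c l).modifyHead (fun p => cur.reverse ++ p) := by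
  intro fuel
  induction fuel with
  | zero =>
    intro l cur accs hlen
    have hl : l = [] := List.length_eq_zero_iff.mp (Nat.le_zero.mp hlen)
    subst hl
    simp [PySem.Chars.splitOn.go, pvSplits]
  | succ n ih =>
    intro l cur accs hlen
    cases l with
    | nil => simp [PySem.Chars.splitOn.go, pvSplits]
    | cons x xs =>
      simp only [PySem.Chars.splitOn.go]
      by_cases hx : x = c
      · subst hx
        have hpre : List.isPrefixOf [x] (x :: xs) = true := by
          simp [List.isPrefixOf]
        rw [if_pos hpre]
        rw [show List.drop [x].length (x :: xs) = xs from rfl]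
        simp only [List.length_cons] at hlen
        rw [ih xs [] (cur.reverse :: accs) (by omega)]
        simp [pvSplits]
        exact pvModifyHead_id _
      · have hpre : List.isPrefixOf [c] (x :: xs) = false := by
          simp [List.isPrefixOf]
          exact fun h => absurd h.symm hx
        rw [if_neg (by simp [hpre])]
        simp only [List.length_cons] at hlen
        rw [ih xs (x :: cur) accs (by omega)]
        simp only [pvSplits, if_neg hx]
        rcases hsp : pvSplits c xs with _ | ⟨p, ps⟩
        · exact absurd hsp (pvSplits_ne_nil c xs)
        · simp

lemma pvSplitOn_eq (c : Char) (l : List Char) :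
    PySem.Chars.splitOn l [c] = pvSplits c l := by
  unfold PySem.Chars.splitOn
  rw [pvSplits_go_eq c (l.length + 1) l [] [] (by omega)]
  rcases hsp : pvSplits c l with _ | ⟨p, ps⟩
  · exact absurd hsp (pvSplits_ne_nil c l)
  · simp

lemma pvSplits_no_mem {c : Char} {l : List Char} (h : c ∉ l) : pvSplits c l = [l] := by
  induction l with
  | nil => rfl
  | cons x xs ih =>
    simp only [List.mem_cons, not_or] at h
    simp only [pvSplits, ih h.2]
    rw [if_neg (fun he => h.1 he.symm)]

lemma pvSplits_append {c : Char} {a : List Char} (b : List Char) (h : c ∉ a) :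
    pvSplits c (a ++ c :: b) = a :: pvSplits c b := by
  induction a with
  | nil => simp [pvSplits]
  | cons x xs ih =>
    simp only [List.mem_cons, not_or] at h
    simp only [List.cons_append, pvSplits, ih h.2]
    rw [if_neg (fun he => h.1 he.symm)]

lemma pvSplit_at_nl (cs : List Char) (hmem : '\n' ∈ cs) :
    ∃ a b, cs = a ++ '\n' :: b ∧ '\n' ∉ a ∧ a = cs.takeWhile (fun x => x != '\n') := by
  cases hdw : cs.dropWhile (fun x => x != '\n') with
  | nil =>
    exfalso
    have hts := List.takeWhile_append_dropWhile (p := fun x => x != '\n') (l := cs)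
    rw [hdw, List.append_nil] at hts
    rw [← hts] at hmem
    have := List.mem_takeWhile_imp hmem
    simp at this
  | cons y ys =>
    have hy : ((fun x => x != '\n') ((cs.dropWhile (fun x => x != '\n')).head (by rw [hdw]; simp))) = false :=
      List.head_dropWhile_not (fun x => x != '\n') (by rw [hdw]; simp)
    have hyy : y = '\n' := by
      have hh : (cs.dropWhile (fun x => x != '\n')).head (by rw [hdw]; simp) = y := by
        simp [hdw]
      rw [hh] at hy
      simpa using hy
    refine ⟨cs.takeWhile (fun x => x != '\n'), ys, ?_, ?_, rfl⟩
    · conv_lhs => rw [← List.takeWhile_append_dropWhile (p := fun x => x != '\n') (l := cs)]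
      rw [hdw, hyy]
    · intro hmem'
      have := List.mem_takeWhile_imp hmem'
      simp at this

lemma pvSplits_head (l : List Char) :
    ∃ r, pvSplits '\n' l = (l.takeWhile (fun x => x != '\n')) :: r := by
  by_cases h : '\n' ∈ l
  · obtain ⟨a, b, hl, hna, hta⟩ := pvSplit_at_nl l h
    rw [hl, pvSplits_append b hna]
    refine ⟨pvSplits '\n' b, ?_⟩
    congr 1
    rw [← hl, hta]
  · rw [pvSplits_no_mem h]
    refine ⟨[], ?_⟩
    congr 1
    exact (List.takeWhile_eq_self_iff.mpr (fun x hx => by simp; intro he; exact h (he ▸ hx))).symm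

-- find s sub = n if sub occurs at n and nowhere earlier
lemma pvFind_eq_of (s sub : List Char) (n : ℕ) (h1 : sub <+: s.drop n)
    (h2 : ∀ i < n, ¬ sub <+: s.drop i) : PySem.Chars.find s sub = n := by
  have hinf : sub <:+: s := h1.isInfix.trans (List.drop_suffix n s).isInfix
  have hne : PySem.Chars.find s sub ≠ -1 := by
    rw [Ne, PySem.Chars.find_eq_neg_one_iff]; exact not_not_intro hinf
  have h0 : 0 ≤ PySem.Chars.find s sub := by
    have := PySem.Chars.neg_one_le_find s sub; omega
  obtain ⟨hp, hmin⟩ := PySem.Chars.find_spec h0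
  have : (PySem.Chars.find s sub).toNat = n := by
    rcases lt_trichotomy (PySem.Chars.find s sub).toNat n with hlt | heq | hgt
    · exact absurd hp (h2 _ hlt)
    · exact heq
    · exact absurd h1 (hmin n hgt)
  omega

lemma pvFind_eq_neg (s sub : List Char) (h : ∀ j, ¬ sub <+: s.drop j) :
    PySem.Chars.find s sub = -1 := by
  rw [PySem.Chars.find_eq_neg_one_iff]
  intro hinf
  have : PySem.Chars.isIn sub s = true := (PySem.Chars.isIn_iff_infix sub s).mpr hinf
  obtain ⟨j, hj⟩ := (PySem.Chars.exists_prefix_drop_iff_isIn sub s).mpr this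
  exact h j hj

-- a "\n…" pattern cannot start inside the newline-free part a
lemma pvNo_nl_prefix {a : List Char} (t rest : List Char) (ha : '\n' ∉ a)
    {j : ℕ} (hj : j < a.length) : ¬ ('\n' :: rest) <+: (a ++ t).drop j := by
  intro hpre
  rw [List.drop_append_of_le_length (by omega)] at hpre
  have hd : ((a.drop j) ++ t).head? = some '\n' := by
    obtain ⟨u, hu⟩ := hpre
    rw [← hu]; rfl
  have hne : a.drop j ≠ [] := by
    intro hd0; rw [List.drop_eq_nil_iff] at hd0; omega
  rw [List.head?_append_of_ne_nil _ hne] at hd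
  rw [List.head?_drop] at hd
  exact ha (List.mem_of_getElem? hd)

lemma pvPrefix_hash_of_startswith {l : List Char}
    (h : PySem.Chars.startswith l ['#', '#'] = true) : ∃ t, l = '#' :: '#' :: t := by
  rw [PySem.Chars.startswith_iff] at h
  obtain ⟨t, ht⟩ := h
  exact ⟨t, ht.symm⟩

-- the main core equality: A's join-of-collected-lines equals B's find-based prefix
lemma pvMain_core : ∀ (cs : List Char),
    PySem.Chars.join ['\n'] (pvCollect (pvSplits '\n' cs)) = pvBcore cs := by
  have H : ∀ (n : ℕ) (cs : List Char), cs.length ≤ n →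
      PySem.Chars.join ['\n'] (pvCollect (pvSplits '\n' cs)) = pvBcore cs := by
    intro n
    induction n with
    | zero =>
      intro cs hlen
      have : cs = [] := List.length_eq_zero_iff.mp (Nat.le_zero.mp hlen)
      subst this
      decide
    | succ n ih =>
      intro cs hlen
      by_cases hS : PySem.Chars.startswith cs ['#', '#'] = true
      · -- first line starts with "##": both sides are empty
        obtain ⟨t, ht⟩ := pvPrefix_hash_of_startswith hS
        obtain ⟨r, hr⟩ := pvSplits_head cs
        have hhead : PySem.Chars.startswith (cs.takeWhile (fun x => x != '\n')) ['#', '#'] = true := by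
          subst ht
          simp [PySem.Chars.startswith, List.isPrefixOf]
        rw [hr]
        simp only [pvCollect, if_pos hhead, PySem.Chars.join_nil, pvBcore, if_pos hS]
      · by_cases hmem : '\n' ∈ cs
        · -- cs = a ++ '\n' :: b with '\n' ∉ a
          obtain ⟨a, b, hcs, hna, -⟩ := pvSplit_at_nl cs hmem
          have hblen : b.length ≤ n := by
            subst hcs; simp at hlen; omega
          have haS : PySem.Chars.startswith a ['#', '#'] = false := by
            rw [Bool.eq_false_iff, Ne, PySem.Chars.startswith_iff]
            intro hpa
            exact hS ((PySem.Chars.startswith_iff cs ['#', '#']).mpr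
              (hpa.trans ⟨'\n' :: b, hcs.symm⟩))
          rw [hcs, pvSplits_append b hna]
          simp only [pvCollect, haS, Bool.false_eq_true, if_false]
          by_cases hbS : PySem.Chars.startswith b ['#', '#'] = true
          · -- the very next line starts with "##": result is a
            obtain ⟨t, htb⟩ := pvPrefix_hash_of_startswith hbS
            obtain ⟨r, hrb⟩ := pvSplits_head b
            have hbhead : PySem.Chars.startswith (b.takeWhile (fun x => x != '\n')) ['#', '#'] = true := by
              subst htb
              simp [PySem.Chars.startswith, List.isPrefixOf]
            rw [hrb]
            simp only [pvCollect, if_pos hbhead, PySem.Chars.join_singleton]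
            -- B: find cs "\n##" = a.length, prefix taken is a
            have hfind : PySem.Chars.find (a ++ '\n' :: b) ['\n', '#', '#'] = (a.length : ℤ) := by
              apply pvFind_eq_of
              · rw [List.drop_left]
                subst htb
                exact ⟨t, rfl⟩
              · intro i hi
                exact pvNo_nl_prefix _ _ hna hi
            simp only [pvBcore, hfind]
            rw [if_neg (by rw [hcs] at hS; simp [hS]), if_neg (by omega)]
            simp
          · -- recurse on b
            have hbB := ih b hblen
            obtain ⟨r, hrb⟩ := pvSplits_head b
            have hbhead : PySem.Chars.startswith (b.takeWhile (fun x => x != '\n')) ['#', '#'] = false := by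
              rw [Bool.eq_false_iff, Ne, PySem.Chars.startswith_iff]
              intro hp
              exact hbS ((PySem.Chars.startswith_iff b ['#', '#']).mpr
                (hp.trans (List.takeWhile_prefix _)))
            have hLHS : PySem.Chars.join ['\n'] ((a :: pvCollect (pvSplits '\n' b))) =
                a ++ '\n' :: PySem.Chars.join ['\n'] (pvCollect (pvSplits '\n' b)) := by
              rw [hrb]
              simp only [pvCollect, hbhead, Bool.false_eq_true, if_false]
              rw [PySem.Chars.join_cons_cons]
              simp
            rw [hLHS, hbB]
            have hcsS : PySem.Chars.startswith (a ++ '\n' :: b) ['#', '#'] = false := by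
              rw [hcs] at hS; simp [hS]
            by_cases hfb : PySem.Chars.find b ['\n', '#', '#'] = -1
            · -- no "##" line at all: both sides are cs
              have hfind : PySem.Chars.find (a ++ '\n' :: b) ['\n', '#', '#'] = -1 := by
                apply pvFind_eq_neg
                intro j hpre
                rcases lt_trichotomy j a.length with hj | hj | hj
                · exact pvNo_nl_prefix _ _ hna hj hpre
                · subst hj
                  rw [List.drop_left] at hpre
                  rw [List.cons_prefix_cons] at hpre
                  exact absurd ((PySem.Chars.startswith_iff b ['#', '#']).mpr hpre.2)
                    (by simp [hbS])
                · have hdrop : (a ++ '\n' :: b).drop j = b.drop (j - a.length - 1) := by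
                    rw [List.drop_append]
                    rw [List.drop_eq_nil_iff.mpr (by omega)]
                    simp only [List.nil_append]
                    rw [show j - a.length = (j - a.length - 1) + 1 by omega]
                    rfl
                  rw [hdrop] at hpre
                  have : PySem.Chars.find b ['\n', '#', '#'] ≠ -1 := by
                    rw [Ne, PySem.Chars.find_eq_neg_one_iff, not_not]
                    exact hpre.isInfix.trans (List.drop_suffix _ b).isInfix
                  exact this hfb
              simp [pvBcore, hcsS, hfind, hbS, hfb]
            · -- first "##" line is inside b at offset find b
              have h0b : 0 ≤ PySem.Chars.find b ['\n', '#', '#'] := by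
                have := PySem.Chars.neg_one_le_find b ['\n', '#', '#']; omega
              set ib := (PySem.Chars.find b ['\n', '#', '#']).toNat with hib
              obtain ⟨hpb, hminb⟩ := PySem.Chars.find_spec h0b
              have hfind : PySem.Chars.find (a ++ '\n' :: b) ['\n', '#', '#'] =
                  ((a.length + 1 + ib : ℕ) : ℤ) := by
                apply pvFind_eq_of
                · have hdrop : (a ++ '\n' :: b).drop (a.length + 1 + ib) = b.drop ib := by
                    rw [List.drop_append]
                    rw [List.drop_eq_nil_iff.mpr (by omega)]
                    simp only [List.nil_append]
                    rw [show a.length + 1 + ib - a.length = ib + 1 by omega]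
                    rfl
                  rw [hdrop]; exact hpb
                · intro j hj hpre
                  rcases lt_trichotomy j a.length with hja | hja | hja
                  · exact pvNo_nl_prefix _ _ hna hja hpre
                  · subst hja
                    rw [List.drop_left] at hpre
                    rw [List.cons_prefix_cons] at hpre
                    exact absurd ((PySem.Chars.startswith_iff b ['#', '#']).mpr hpre.2)
                      (by simp [hbS])
                  · have hdrop : (a ++ '\n' :: b).drop j = b.drop (j - a.length - 1) := by
                      rw [List.drop_append]
                      rw [List.drop_eq_nil_iff.mpr (by omega)]
                      simp only [List.nil_append]
                      rw [show j - a.length = (j - a.length - 1) + 1 by omega]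
                      rfl
                    rw [hdrop] at hpre
                    exact hminb _ (by omega) hpre
              simp only [pvBcore, hcsS, Bool.false_eq_true, if_false, hfind]
              rw [if_neg hbS, if_neg hfb]
              rw [if_neg (show ¬ ((a.length + 1 + ib : ℕ) : ℤ) = -1 by omega)]
              rw [Int.toNat_natCast]
              rw [List.take_append]
              rw [List.take_of_length_le (show a.length ≤ a.length + 1 + ib by omega)]
              rw [show a.length + 1 + ib - a.length = ib + 1 by omega]
              rw [show List.take (ib + 1) ('\n' :: b) = '\n' :: List.take ib b from rfl]
        · -- no newline: a single line
          rw [pvSplits_no_mem hmem]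
          simp only [pvCollect, hS, Bool.false_eq_true, if_false, PySem.Chars.join_singleton]
          have hfind : PySem.Chars.find cs ['\n', '#', '#'] = -1 := by
            apply pvFind_eq_neg
            intro j hpre
            have : '\n' ∈ cs := by
              have hsub : ('\n' : Char) ∈ cs.drop j := hpre.subset (by simp)
              exact (List.mem_of_mem_drop hsub)
            exact hmem this
          simp [pvBcore, hS, hfind]
  intro cs
  exact H cs.length cs le_rfl

-- ===== VERDICT (by name: the statement is the Claim_ definition above) =====
theorem extract_header_spec : Claim_equal_extract_header := by
  intro s _
  show extract_header s = extract_header_alt s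
  have hA : extract_header s =
      String.ofList (PySem.Chars.strip (pvBcore s.toList)) := by
    show String.ofList (PySem.Chars.strip
        (PySem.Chars.join ['\n'] (pvCollect (PySem.Chars.splitOn s.toList ['\n'])))) = _
    rw [pvSplitOn_eq, pvMain_core]
  have halt : extract_header_alt s =
      if PySem.Chars.startswith s.toList ['#', '#'] = true then ""
      else if PySem.Chars.find s.toList ['\n', '#', '#'] = -1 then PySem.Str.strip s
      else PySem.Str.strip (PySem.Str.slice s none (some (PySem.Chars.find s.toList ['\n', '#', '#']))) := rfl
  rw [hA, halt]
  unfold pvBcore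
  by_cases hS : PySem.Chars.startswith s.toList ['#', '#'] = true
  · rw [if_pos hS, if_pos hS]
    rfl
  · rw [if_neg hS, if_neg hS]
    by_cases hf : PySem.Chars.find s.toList ['\n', '#', '#'] = -1
    · rw [if_pos hf, if_pos hf]
      rfl
    · rw [if_neg hf, if_neg hf]
      have h0 : 0 ≤ PySem.Chars.find s.toList ['\n', '#', '#'] := by
        have := PySem.Chars.neg_one_le_find s.toList ['\n', '#', '#']; omega
      have hsl : (PySem.Str.slice s none (some (PySem.Chars.find s.toList ['\n', '#', '#']))).toList =
          List.take (PySem.Chars.find s.toList ['\n', '#', '#']).toNat s.toList := by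
        rw [PySem.Str.toList_slice, PySem.Chars.slice_eq_listSlice,
          PySem.List.slice_to _ h0]
      show _ = String.ofList (PySem.Chars.strip
        (PySem.Str.slice s none (some (PySem.Chars.find s.toList ['\n', '#', '#']))).toList)
      rw [hsl]
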